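-- pv_equiv track=rewrite | github.com/modflowai/flopy-expert | src/flopy_docs_parser.py | _extract_toctree_patterns
-- ===== SOURCE A (Python) =====
-- from typing import List, Dict, Tuple
--
-- def _extract_toctree_patterns(section_content: str) -> List[str]:
--     """Extract patterns from toctree directives"""
--     patterns = []
--     lines = section_content.split('\n')
--
--     in_toctree = False
--     for i, line in enumerate(lines):
--         stripped = line.strip()
--
--         # Start of toctree
--         if stripped.startswith(".. toctree::"):
--             in_toctree = True
--             continue
--
--         # End of toctree - next directive
--         if in_toctree and stripped.startswith(".."):
--             in_toctree = False
--             continue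
--
--         # Skip toctree options
--         if in_toctree and stripped.startswith(":"):
--             continue
--
--         # Extract pattern
--         if in_toctree and stripped and not stripped.startswith(":"):
--             patterns.append(stripped)
--
--     return patterns
-- ===== SOURCE B (Python) =====
-- from typing import List
--
-- def _extract_toctree_patterns(section_content: str) -> List[str]:
--     """Two-phase: collect toctree block bodies, then filter each body."""
--     stripped = [ln.strip() for ln in section_content.split('\n')]
--
--     # Phase 1: gather the body lines of every toctree block.
--     blocks = []
--     cur = None  # body of the currently open block, or None
--     for s in stripped:
--         if s.startswith(".. toctree::"):
--             if cur is not None: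
--                 blocks.append(cur)
--             cur = []
--         elif s.startswith(".."):
--             if cur is not None:
--                 blocks.append(cur)
--                 cur = None
--         elif cur is not None:
--             cur.append(s)
--     if cur is not None:
--         blocks.append(cur)
--
--     # Phase 2: keep the non-empty, non-option lines of each block.
--     return [s for blk in blocks for s in blk if s and not s.startswith(':')]
-- ===== Notes on version B (the rewrite author's own statement) =====
-- stated objective: alternative
-- what changed: Replaces A's single flag-driven line scan (an in_toctree boolean with inline filtering and appending) by a two-phase decomposition: first collect the body lines of each toctree block into explicit block lists, then filter every block for non-empty non-option lines in a separate comprehension.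
import Mathlib
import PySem

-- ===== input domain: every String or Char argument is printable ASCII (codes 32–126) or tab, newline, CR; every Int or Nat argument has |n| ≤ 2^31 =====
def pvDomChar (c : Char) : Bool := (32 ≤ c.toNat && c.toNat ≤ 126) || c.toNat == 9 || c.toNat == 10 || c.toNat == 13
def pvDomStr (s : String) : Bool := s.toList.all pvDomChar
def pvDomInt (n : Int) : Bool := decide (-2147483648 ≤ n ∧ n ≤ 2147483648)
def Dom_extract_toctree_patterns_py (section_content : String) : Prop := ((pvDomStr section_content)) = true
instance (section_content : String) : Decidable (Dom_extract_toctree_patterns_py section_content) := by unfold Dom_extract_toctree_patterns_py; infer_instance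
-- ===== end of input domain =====

-- B replaces A's flag-driven scan with a two-phase decomposition (collect toctree block bodies, then filter them); same cost, alternative structure.


-- ===== PORT A =====
-- one step of A's loop body: state = (in_toctree, patterns)
def pvAStep (st : Bool × List String) (line : String) : Bool × List String :=
  let stripped := PySem.Str.strip line
  if PySem.Str.startswith stripped ".. toctree::" then (true, st.2)
  else if st.1 && PySem.Str.startswith stripped ".." then (false, st.2)
  else if st.1 && PySem.Str.startswith stripped ":" then st
  else if st.1 && !(stripped == "") && !PySem.Str.startswith stripped ":" then (st.1, st.2 ++ [stripped])
  else st

def extract_toctree_patterns_py (section_content : String) : List String :=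
  let lines := (PySem.Str.split? section_content "\n").getD []   -- sep "\n" ≠ "", so split? is always `some`
  ((PySem.List.enumerate lines).foldl (fun st p => pvAStep st p.2) (false, [])).2

-- ===== PORT B =====
-- B's phase-2 per-line filter: non-empty and not an option line
def pvKeep (s : String) : Bool := !(s == "") && !PySem.Str.startswith s ":"

-- one step of B's phase-1 loop: state = (blocks, cur) where cur is the open block body (or none)
def pvBStep (st : List (List String) × Option (List String)) (s : String) :
    List (List String) × Option (List String) :=
  if PySem.Str.startswith s ".. toctree::" then
    (match st.2 with | some c => st.1 ++ [c] | none => st.1, some [])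
  else if PySem.Str.startswith s ".." then
    (match st.2 with | some c => (st.1 ++ [c], none) | none => st)
  else
    (match st.2 with | some c => (st.1, some (c ++ [s])) | none => st)

def extract_toctree_patterns_py_alt (section_content : String) : List String :=
  let stripped := ((PySem.Str.split? section_content "\n").getD []).map PySem.Str.strip
  let st := stripped.foldl pvBStep (([] : List (List String)), (none : Option (List String)))
  let blocks := st.1 ++ (match st.2 with | some c => [c] | none => [])
  blocks.flatMap (fun blk => blk.filter pvKeep)

-- ===== PRECONDITION & SPEC =====
def Spec_extract_toctree_patterns_py (section_content : String) (out : List String) : Prop := out = extract_toctree_patterns_py_alt section_content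
instance (section_content : String) (out : List String) : Decidable (Spec_extract_toctree_patterns_py section_content out) := by unfold Spec_extract_toctree_patterns_py; infer_instance

-- ===== CLAIM (what is proved, stated in full; the proofs are below) =====
def Claim_equal_extract_toctree_patterns_py : Prop := ∀ (section_content : String), Dom_extract_toctree_patterns_py section_content → Spec_extract_toctree_patterns_py section_content (extract_toctree_patterns_py section_content)

-- ===== LEMMAS AND PROOFS =====

-- common recursive characterisation of the kept lines (over already-stripped lines, with the in_toctree flag)
def pvG : List String → Bool → List String
  | [], _ => []
  | s :: t, b =>
    if PySem.Str.startswith s ".. toctree::" then pvG t true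
    else if b && PySem.Str.startswith s ".." then pvG t false
    else if b && pvKeep s then s :: pvG t b
    else pvG t b

-- folding a pair function that ignores the index over `enumerate` is folding over the list
theorem pv_foldl_enumerate {σ α : Type} (f : σ → α → σ) (ls : List α) (n : Int) (st : σ) :
    (PySem.List.enumerate ls n).foldl (fun st p => f st p.2) st = ls.foldl f st := by
  induction ls generalizing n st with
  | nil => simp [PySem.List.enumerate]
  | cons x t ih => rw [PySem.List.enumerate_cons]; simp only [List.foldl_cons]; exact ih _ _

-- A's fold computes pvG of the stripped lines
theorem pv_A_eq_g (ls : List String) (b : Bool) (acc : List String) :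
    (ls.foldl pvAStep (b, acc)).2 = acc ++ pvG (ls.map PySem.Str.strip) b := by
  induction ls generalizing b acc with
  | nil => simp [pvG]
  | cons x t ih =>
    cases h1 : PySem.Str.startswith (PySem.Str.strip x) ".. toctree::" <;>
    cases hb : b <;>
    cases h2 : PySem.Str.startswith (PySem.Str.strip x) ".." <;>
    cases h3 : PySem.Str.startswith (PySem.Str.strip x) ":" <;>
    cases h4 : (PySem.Str.strip x == "") <;>
      simp only [List.foldl_cons, List.map_cons, pvAStep, pvG, pvKeep, h1, h2, h3, h4,
        Bool.and_true, Bool.and_false, Bool.not_true, Bool.not_false, if_true, if_false,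
        Bool.false_eq_true, ih] <;>
      simp

-- B's phase-1 fold only appends to the blocks accumulator
theorem pv_B_prefix (t : List String) (blocks : List (List String)) (cur : Option (List String)) :
    t.foldl pvBStep (blocks, cur)
      = (blocks ++ (t.foldl pvBStep ([], cur)).1, (t.foldl pvBStep ([], cur)).2) := by
  induction t generalizing blocks cur with
  | nil => simp
  | cons s t ih =>
    simp only [List.foldl_cons]
    have hstep : pvBStep (blocks, cur) s
        = (blocks ++ (pvBStep ([], cur) s).1, (pvBStep ([], cur) s).2) := by
      cases cur <;> cases h1 : PySem.Str.startswith s ".. toctree::" <;>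
        cases h2 : PySem.Str.startswith s ".." <;>
        simp only [pvBStep, h1, h2, Bool.false_eq_true, if_true, if_false] <;> simp
    rw [hstep, ih (blocks ++ (pvBStep ([], cur) s).1) ((pvBStep ([], cur) s).2)]
    conv_rhs => rw [show pvBStep ([], cur) s = ((pvBStep ([], cur) s).1, (pvBStep ([], cur) s).2) from rfl,
      ih ((pvBStep ([], cur) s).1) ((pvBStep ([], cur) s).2)]
    simp

-- B's collected blocks, filtered and flattened, are cur's kept lines followed by pvG
theorem pv_B_eq_g (ls : List String) (cur : Option (List String)) :
    ((ls.foldl pvBStep ([], cur)).1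
        ++ (match (ls.foldl pvBStep ([], cur)).2 with | some c => [c] | none => [])).flatMap
        (fun blk => blk.filter pvKeep)
      = (match cur with | some c => c.filter pvKeep | none => []) ++ pvG ls cur.isSome := by
  induction ls generalizing cur with
  | nil => cases cur <;> simp [pvG]
  | cons s t ih =>
    simp only [List.foldl_cons]
    rw [show pvBStep ([], cur) s = ((pvBStep ([], cur) s).1, (pvBStep ([], cur) s).2) from rfl,
      pv_B_prefix t ((pvBStep ([], cur) s).1) ((pvBStep ([], cur) s).2)]
    rw [show ((pvBStep ([], cur) s).1 ++ (t.foldl pvBStep ([], (pvBStep ([], cur) s).2)).1)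
          ++ (match (t.foldl pvBStep ([], (pvBStep ([], cur) s).2)).2 with | some c => [c] | none => [])
        = (pvBStep ([], cur) s).1 ++ ((t.foldl pvBStep ([], (pvBStep ([], cur) s).2)).1
          ++ (match (t.foldl pvBStep ([], (pvBStep ([], cur) s).2)).2 with | some c => [c] | none => [])) from by simp]
    rw [List.flatMap_append, ih ((pvBStep ([], cur) s).2)]
    cases cur <;> cases h1 : PySem.Str.startswith s ".. toctree::" <;>
      cases h2 : PySem.Str.startswith s ".." <;> cases h3 : pvKeep s <;>
      simp only [pvBStep, pvG, h1, h2, h3, Bool.false_eq_true, Bool.true_and, Bool.false_and,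
        if_true, if_false, List.filter_append, List.filter_cons, List.filter_nil,
        List.flatMap_nil, List.flatMap_cons, List.append_nil, List.nil_append, Option.isSome] <;>
      simp

-- ===== VERDICT (by name: the statement is the Claim_ definition above) =====
theorem extract_toctree_patterns_py_spec : Claim_equal_extract_toctree_patterns_py := by
  intro sc _
  unfold Spec_extract_toctree_patterns_py extract_toctree_patterns_py extract_toctree_patterns_py_alt
  simp only [pv_foldl_enumerate, pv_A_eq_g, pv_B_eq_g]
  simp
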